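-- pv_equiv track=rewrite | github.com/binggo1234/2d-csp-code | src/inrp/mcts.py | _position_ladder
-- ===== SOURCE A (Python) =====
-- from typing import Any, Dict, List, Optional, Sequence, Set, Tuple
--
-- def _position_ladder(start: int, delta: int, max_positions: int) -> List[int]:
--     out: List[int] = []
--     pos = max(0, int(start))
--     for _ in range(max(1, int(max_positions))):
--         out.append(pos)
--         if pos <= 0:
--             break
--         pos = max(0, pos - max(1, int(delta)))
--     return out
-- ===== SOURCE B (Python) =====
-- from typing import List
--
-- def _position_ladder(start: int, delta: int, max_positions: int) -> List[int]:
--     p0 = max(0, int(start))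
--     n = max(1, int(max_positions))
--     if p0 <= 0:
--         return [0]
--     d = max(1, int(delta))
--     k = min(n, (p0 + d - 1) // d + 1)
--     return [max(0, p0 - i * d) for i in range(k)]
-- ===== Notes on version B (the rewrite author's own statement) =====
-- stated objective: alternative
-- what changed: Replaces A's imperative step-and-break loop carrying a running position by a closed-form ceiling-division count of elements plus a direct index-to-value comprehension.
import Mathlib
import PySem

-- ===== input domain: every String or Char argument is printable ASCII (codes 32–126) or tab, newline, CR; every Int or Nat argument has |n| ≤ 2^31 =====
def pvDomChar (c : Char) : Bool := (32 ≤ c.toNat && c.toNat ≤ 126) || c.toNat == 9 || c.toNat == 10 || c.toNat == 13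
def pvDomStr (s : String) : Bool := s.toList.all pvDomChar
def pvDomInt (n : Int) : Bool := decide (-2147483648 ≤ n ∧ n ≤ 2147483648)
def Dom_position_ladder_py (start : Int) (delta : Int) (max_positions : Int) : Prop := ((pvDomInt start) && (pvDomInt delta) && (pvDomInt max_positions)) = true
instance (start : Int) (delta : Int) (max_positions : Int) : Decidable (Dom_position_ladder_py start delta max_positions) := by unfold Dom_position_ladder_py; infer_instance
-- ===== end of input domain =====

-- B replaces A's step-and-break loop by a closed-form ceiling-division element count
-- and a direct index→value comprehension (objective: alternative decomposition).

-- ===== PORT A =====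
-- the for-loop of A: fuel = remaining range iterations, pos = running position
def ladderGoA : Nat → Int → Int → List Int
  | 0, _, _ => []
  | Nat.succ n, pos, delta =>
      pos :: (if pos ≤ 0 then [] else ladderGoA n (max 0 (pos - max 1 delta)) delta)

def position_ladder_py (start : Int) (delta : Int) (max_positions : Int) : List Int :=
  ladderGoA (max 1 max_positions).toNat (max 0 start) delta

-- ===== PORT B =====
def position_ladder_py_alt (start : Int) (delta : Int) (max_positions : Int) : List Int :=
  let p0 : Int := max 0 start
  let n : Int := max 1 max_positions
  if p0 ≤ 0 then [0]
  else
    let d : Int := max 1 delta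
    let k : Int := min n (PySem.Int.floordiv (p0 + d - 1) d + 1)
    (List.range k.toNat).map (fun (i : Nat) => max 0 (p0 - (i : Int) * d))

-- ===== PRECONDITION & SPEC =====
def Spec_position_ladder_py (start : Int) (delta : Int) (max_positions : Int) (out : List Int) : Prop := out = position_ladder_py_alt start delta max_positions
instance (start : Int) (delta : Int) (max_positions : Int) (out : List Int) : Decidable (Spec_position_ladder_py start delta max_positions out) := by unfold Spec_position_ladder_py; infer_instance

-- ===== CLAIM (what is proved, stated in full; the proofs are below) =====
def Claim_equal_position_ladder_py : Prop := ∀ (start : Int) (delta : Int) (max_positions : Int), Dom_position_ladder_py start delta max_positions → Spec_position_ladder_py start delta max_positions (position_ladder_py start delta max_positions)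

-- ===== LEMMAS AND PROOFS =====

-- the running-position loop equals the closed-form comprehension
theorem ladderGoA_closed (N : Nat) (pos delta : Int) (hp : 0 ≤ pos) (hN : 1 ≤ N) :
    ladderGoA N pos delta =
      (List.range (min (N : Int) ((pos + max 1 delta - 1) / max 1 delta + 1)).toNat).map
        (fun (i : Nat) => max 0 (pos - (i : Int) * max 1 delta)) := by
  induction N generalizing pos with
  | zero => omega
  | succ m ih =>
    have hd : 1 ≤ max 1 delta := le_max_left _ _
    set d : Int := max 1 delta with hdd
    rcases lt_or_ge 0 pos with hpos | hpos
    · -- pos > 0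
      have hc : (pos + d - 1) / d = (pos - 1) / d + 1 := by
        have h : pos + d - 1 = (pos - 1) + 1 * d := by ring
        rw [h, Int.add_mul_ediv_right _ _ (by omega : d ≠ 0)]
      have hcnn : 0 ≤ (pos - 1) / d := Int.ediv_nonneg (by omega) (by omega)
      rcases Nat.eq_zero_or_pos m with hm | hm
      · -- last iteration: N = 1
        subst hm
        have hk : (min (((0 + 1 : Nat) : Int)) ((pos + d - 1) / d + 1)).toNat = 1 := by
          rw [hc]; push_cast; omega
        rw [hk]
        simp only [ladderGoA, if_neg (by omega : ¬ pos ≤ 0), List.range_one, List.map_cons,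
          List.map_nil, Nat.cast_zero]
        have : max 0 (pos - 0 * d) = pos := by
          have : (0 : Int) * d = 0 := by ring
          omega
        rw [this]
      · -- N = m+1, m ≥ 1
        have hpos' : (0 : Int) ≤ max 0 (pos - d) := le_max_left _ _
        have hc' : (max 0 (pos - d) + d - 1) / d = (pos - 1) / d := by
          rcases le_or_gt pos d with hle | hgt
          · have h1 : max 0 (pos - d) = 0 := by omega
            have h2 : (0 + d - 1) / d = 0 := Int.ediv_eq_zero_of_lt (by omega) (by omega)
            have h3 : (pos - 1) / d = 0 := Int.ediv_eq_zero_of_lt (by omega) (by omega)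
            rw [h1, h2, h3]
          · have h1 : max 0 (pos - d) = pos - d := by omega
            rw [h1]
            congr 1
            ring
        have hK : (min (((m + 1 : Nat)) : Int) ((pos + d - 1) / d + 1)).toNat
                = (min ((m : Nat) : Int) ((max 0 (pos - d) + d - 1) / d + 1)).toNat + 1 := by
          rw [hc, hc']; push_cast; omega
        rw [hK, List.range_succ_eq_map, List.map_cons, List.map_map]
        simp only [ladderGoA, if_neg (by omega : ¬ pos ≤ 0)]
        rw [← hdd]
        congr 1
        · have h0 : ((0 : Nat) : Int) * d = 0 := by push_cast; ring
          rw [h0]; omega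
        · rw [ih (max 0 (pos - d)) hpos' hm]
          apply List.map_congr_left
          intro i _
          simp only [Function.comp]
          have hi : (0 : Int) ≤ (i : Int) * d := mul_nonneg (Int.natCast_nonneg i) (by omega)
          have hsd : ((Nat.succ i : Nat) : Int) * d = (i : Int) * d + d := by push_cast; ring
          rw [hsd]
          omega
    · -- pos = 0: one element then break
      have hp0 : pos = 0 := le_antisymm hpos hp
      subst hp0
      have h2 : ((0 : Int) + d - 1) / d = 0 := Int.ediv_eq_zero_of_lt (by omega) (by omega)
      have hk : (min (((m + 1 : Nat)) : Int) (((0 : Int) + d - 1) / d + 1)).toNat = 1 := by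
        rw [h2]; push_cast; omega
      rw [hk]
      simp only [ladderGoA, if_pos (le_refl (0 : Int)), List.range_one, List.map_cons,
        List.map_nil, Nat.cast_zero]
      have : max 0 ((0 : Int) - 0 * d) = 0 := by
        have : (0 : Int) * d = 0 := by ring
        omega
      rw [this]

-- ===== VERDICT (by name: the statement is the Claim_ definition above) =====
theorem position_ladder_py_spec : Claim_equal_position_ladder_py := by
  intro start delta max_positions _
  unfold Spec_position_ladder_py position_ladder_py position_ladder_py_alt
  have hd : (0 : Int) < max 1 delta := by omega
  have hn : (1 : Int) ≤ max 1 max_positions := le_max_left _ _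
  by_cases h0 : max 0 start ≤ 0
  · -- start ≤ 0: A appends 0 once then breaks; B returns [0]
    have hs : max 0 start = 0 := by omega
    obtain ⟨m, hm⟩ : ∃ m, (max 1 max_positions).toNat = m + 1 :=
      ⟨(max 1 max_positions).toNat - 1, by omega⟩
    simp [hs, hm, ladderGoA]
  · simp only [if_neg h0]
    rw [ladderGoA_closed _ _ _ (by omega) (by omega)]
    rw [PySem.Int.floordiv_eq_ediv_of_pos hd]
    rw [show (((max 1 max_positions).toNat : Int)) = max 1 max_positions from by omega]
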